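-- pv_equiv track=rewrite | github.com/josd/josd.github.io | brains/cases/family.py | compute_gendered_parents
-- ===== SOURCE A (Python) =====
-- from typing import Dict, Iterable, List, Set, Tuple
--
-- Pair = Tuple[str, str]
--
-- def compute_grandparent(parent: Set[Pair]) -> Set[Pair]:
--     """
--     grandparent(x,z) iff ∃y: parent(x,y) ∧ parent(y,z)
--     """
--     grand: Set[Pair] = set()
--     for (x, y1) in parent:
--         for (y2, z) in parent:
--             if y1 == y2:
--                 grand.add((x, z))
--     return grand
--
-- def compute_gendered_parents(
--     parent: Set[Pair], male: Set[str], female: Set[str]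
-- ) -> Tuple[Set[Pair], Set[Pair], Set[Pair], Set[Pair]]:
--     """
--     father(x,y), mother(x,y), grandfather(x,z), grandmother(x,z).
--     """
--     father: Set[Pair] = set()
--     mother: Set[Pair] = set()
--     for (x, y) in parent:
--         if x in male:
--             father.add((x, y))
--         if x in female:
--             mother.add((x, y))
--
--     grandparent = compute_grandparent(parent)
--     grandfather: Set[Pair] = set()
--     grandmother: Set[Pair] = set()
--     for (x, z) in grandparent:
--         if x in male:
--             grandfather.add((x, z))
--         if x in female:
--             grandmother.add((x, z))
--
--     return father, mother, grandfather, grandmother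
-- ===== SOURCE B (Python) =====
-- def compute_gendered_parents(parent, male, female):
--     # One-pass filters for the gendered parent relations, and a hash index
--     # (children-by-parent) replacing the quadratic self-join for grandparents.
--     father = {(x, y) for (x, y) in parent if x in male}
--     mother = {(x, y) for (x, y) in parent if x in female}
--
--     children = {}
--     for (y, z) in parent:
--         children.setdefault(y, []).append(z)
--
--     grandparent = set()
--     for (x, y) in parent:
--         for z in children.get(y, ()):
--             grandparent.add((x, z))
--
--     grandfather = {(x, z) for (x, z) in grandparent if x in male}
--     grandmother = {(x, z) for (x, z) in grandparent if x in female}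
--     return father, mother, grandfather, grandmother
-- ===== Notes on version B (the rewrite author's own statement) =====
-- stated objective: alternative
-- what changed: Replaces the nested-loop self-join for grandparents with a hash index of children keyed by parent, and builds father/mother by set-comprehension filters instead of one loop with two conditional adds.
import Mathlib
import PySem

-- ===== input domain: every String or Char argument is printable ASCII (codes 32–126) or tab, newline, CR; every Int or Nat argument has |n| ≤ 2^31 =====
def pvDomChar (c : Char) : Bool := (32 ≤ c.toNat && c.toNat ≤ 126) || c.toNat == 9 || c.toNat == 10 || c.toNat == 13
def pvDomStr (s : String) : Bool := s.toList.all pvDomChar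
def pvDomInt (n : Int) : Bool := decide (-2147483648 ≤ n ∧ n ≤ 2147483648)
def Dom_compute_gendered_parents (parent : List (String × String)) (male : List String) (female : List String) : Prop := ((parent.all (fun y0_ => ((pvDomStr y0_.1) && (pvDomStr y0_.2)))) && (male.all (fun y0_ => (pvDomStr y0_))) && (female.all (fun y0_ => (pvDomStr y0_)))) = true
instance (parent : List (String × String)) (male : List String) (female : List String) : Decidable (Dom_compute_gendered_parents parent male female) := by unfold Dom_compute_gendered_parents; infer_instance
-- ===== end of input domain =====

-- B replaces A's quadratic nested-loop grandparent self-join with a hash index of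
-- children keyed by parent; equivalence of the RETURN value is proved (inputs/outputs
-- are Python sets, represented as duplicate-free lists).

-- ===== PORT A =====
-- shared loop body: if x in male: add to first set; if x in female: add to second set
def genderedAddStep (male female : List String)
    (fm : PySem.Set (String × String) × PySem.Set (String × String))
    (p : String × String) : PySem.Set (String × String) × PySem.Set (String × String) :=
  let fm1 := if PySem.Set.contains male p.1 then (PySem.Set.add fm.1 p, fm.2) else fm
  if PySem.Set.contains female p.1 then (fm1.1, PySem.Set.add fm1.2 p) else fm1

-- nested self-join: for (x,y1) in parent: for (y2,z) in parent: if y1 == y2: add (x,z)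
def compute_grandparent (parent : List (String × String)) : PySem.Set (String × String) :=
  parent.foldl (fun grand p =>
    parent.foldl (fun g q =>
      if p.2 == q.1 then PySem.Set.add g (p.1, q.2) else g) grand) PySem.Set.empty

def compute_gendered_parents (parent : List (String × String)) (male : List String) (female : List String) : (List (String × String)) × (List (String × String)) × (List (String × String)) × (List (String × String)) :=
  let fm := parent.foldl (genderedAddStep male female) (PySem.Set.empty, PySem.Set.empty)
  let grandparent := compute_grandparent parent
  let gfgm := grandparent.foldl (genderedAddStep male female) (PySem.Set.empty, PySem.Set.empty)
  (fm.1, fm.2, gfgm.1, gfgm.2)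

-- ===== PORT B =====
-- children[y] = list of z with (y,z) in parent (setdefault(y, []).append(z) = modify)
def cgpChildren (parent : List (String × String)) : PySem.Dict String (List String) :=
  parent.foldl (fun d p => d.modify p.1 [] (· ++ [p.2])) PySem.Dict.empty

def compute_gendered_parents_alt (parent : List (String × String)) (male : List String) (female : List String) : (List (String × String)) × (List (String × String)) × (List (String × String)) × (List (String × String)) :=
  let father := PySem.Set.ofList (parent.filter (fun p => PySem.Set.contains male p.1))
  let mother := PySem.Set.ofList (parent.filter (fun p => PySem.Set.contains female p.1))
  let children := cgpChildren parent
  let grandparent := parent.foldl (fun g p =>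
    (children.getD p.2 []).foldl (fun g z => PySem.Set.add g (p.1, z)) g) PySem.Set.empty
  let grandfather := PySem.Set.ofList (grandparent.filter (fun p => PySem.Set.contains male p.1))
  let grandmother := PySem.Set.ofList (grandparent.filter (fun p => PySem.Set.contains female p.1))
  (father, mother, grandfather, grandmother)

-- ===== PRECONDITION & SPEC =====
def Spec_compute_gendered_parents (parent : List (String × String)) (male : List String) (female : List String) (out : (List (String × String)) × (List (String × String)) × (List (String × String)) × (List (String × String))) : Prop := out = compute_gendered_parents_alt parent male female
instance (parent : List (String × String)) (male : List String) (female : List String) (out : (List (String × String)) × (List (String × String)) × (List (String × String)) × (List (String × String))) : Decidable (Spec_compute_gendered_parents parent male female out) := by unfold Spec_compute_gendered_parents; infer_instance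

-- ===== CLAIM (what is proved, stated in full; the proofs are below) =====
def Claim_equal_compute_gendered_parents : Prop := ∀ (parent : List (String × String)) (male : List String) (female : List String), Dom_compute_gendered_parents parent male female → Spec_compute_gendered_parents parent male female (compute_gendered_parents parent male female)

-- ===== LEMMAS AND PROOFS =====

-- a fold that conditionally performs a step IS the unconditional fold over the filtered, mapped list
theorem foldl_if_filter_map {α β γ : Type} (c : α → Bool) (f : α → γ) (step : β → γ → β) :
    ∀ (l : List α) (s : β),
      l.foldl (fun s a => if c a then step s (f a) else s) s
        = ((l.filter c).map f).foldl step s := by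
  intro l
  induction l with
  | nil => intro s; rfl
  | cons a t ih =>
    intro s
    by_cases h : c a = true
    · simp [List.foldl_cons, h, ih]
    · simp [List.foldl_cons, h, ih]

-- the paired conditional-add loop splits into two independent conditional folds
theorem fm_split (male female : List String) :
    ∀ (l : List (String × String)) (f m : List (String × String)),
      l.foldl (genderedAddStep male female) (f, m)
        = (l.foldl (fun s p => if PySem.Set.contains male p.1 then PySem.Set.add s p else s) f,
           l.foldl (fun s p => if PySem.Set.contains female p.1 then PySem.Set.add s p else s) m) := by
  intro l
  induction l with
  | nil => intro f m; rfl
  | cons a t ih =>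
    intro f m
    cases h1 : PySem.Set.contains male a.1 <;>
      cases h2 : PySem.Set.contains female a.1 <;>
      simp only [List.foldl_cons, genderedAddStep, h1, h2, Bool.false_eq_true,
        if_true, if_false, ite_true, ite_false, ih]

-- one conditional fold from the empty set is the set of the filtered list
theorem cond_fold_eq_ofList (c : String × String → Bool) (l : List (String × String)) :
    l.foldl (fun s p => if c p then PySem.Set.add s p else s) PySem.Set.empty
      = PySem.Set.ofList (l.filter c) := by
  have h := foldl_if_filter_map c id PySem.Set.add l PySem.Set.empty
  rw [List.map_id] at h
  rw [PySem.Set.ofList_eq_foldl]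
  exact h

-- the hash index returns exactly the inner filter of the self-join
theorem children_getD (parent : List (String × String)) (y : String) :
    (cgpChildren parent).getD y []
      = (parent.filter (fun q => q.1 == y)).map (·.2) := by
  unfold cgpChildren
  rw [PySem.Dict.getD_foldl_modify_append]
  simp

-- A's grandparent computation equals B's index-driven one
theorem grandparent_eq (parent : List (String × String)) :
    compute_grandparent parent
      = parent.foldl (fun g p =>
          ((cgpChildren parent).getD p.2 []).foldl
            (fun g z => PySem.Set.add g (p.1, z)) g) PySem.Set.empty := by
  unfold compute_grandparent
  congr 1
  funext g p
  have h := foldl_if_filter_map (fun q => p.2 == q.1) (fun q => (p.1, q.2)) PySem.Set.add parent g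
  rw [children_getD, h, List.foldl_map, List.foldl_map]
  congr 2
  funext q
  exact Bool.beq_comm

-- ===== VERDICT (by name: the statement is the Claim_ definition above) =====
theorem compute_gendered_parents_spec : Claim_equal_compute_gendered_parents := by
  intro parent male female _
  show _ = _
  unfold compute_gendered_parents compute_gendered_parents_alt
  dsimp only
  rw [fm_split, fm_split, grandparent_eq, cond_fold_eq_ofList, cond_fold_eq_ofList,
      cond_fold_eq_ofList, cond_fold_eq_ofList]
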